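-- pv_equiv track=rewrite | github.com/DataDog/integrations-core | tibco_ems/datadog_checks/tibco_ems/check.py | section_output
-- ===== SOURCE A (Python) =====
-- def section_output(output):
--     sections = {}
--     current_command = None
--     current_section = []
--
--     for line in output.strip().split('\n'):
--         if line.startswith("Command:"):
--             if current_command:
--                 sections[current_command] = "\n".join(current_section)
--             current_command = line.split("Command:")[1].strip()
--             current_section = []
--         elif current_command:
--             current_section.append(line)
--
--     if current_command:
--         sections[current_command] = "\n".join(current_section)
--
--     return sections
-- ===== SOURCE B (Python) =====
-- def section_output(output):
--     lines = output.strip().split('\n')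
--     starts = [i for i, line in enumerate(lines) if line.startswith("Command:")]
--     sections = {}
--     for start, nxt in zip(starts, starts[1:] + [len(lines)]):
--         cmd = lines[start].split("Command:")[1].strip()
--         if cmd:
--             sections[cmd] = "\n".join(lines[start + 1:nxt])
--     return sections
-- ===== Notes on version B (the rewrite author's own statement) =====
-- stated objective: alternative
-- what changed: Replaced A's single-pass accumulator/flush state machine (current_command, current_section, end-of-loop flush) by an index-table decomposition: collect the indices of 'Command:' header lines once, then build each section by slicing the line list between consecutive header indices.
import Mathlib
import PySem

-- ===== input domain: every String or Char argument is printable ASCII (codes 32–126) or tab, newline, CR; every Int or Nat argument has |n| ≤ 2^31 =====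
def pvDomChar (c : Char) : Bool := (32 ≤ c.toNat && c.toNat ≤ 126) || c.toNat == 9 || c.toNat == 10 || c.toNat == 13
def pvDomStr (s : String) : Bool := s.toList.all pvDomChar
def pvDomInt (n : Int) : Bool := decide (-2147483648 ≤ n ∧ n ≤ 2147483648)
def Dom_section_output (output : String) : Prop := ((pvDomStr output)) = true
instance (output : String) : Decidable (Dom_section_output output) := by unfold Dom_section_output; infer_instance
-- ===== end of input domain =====

-- B replaces A's accumulator/flush state machine by an index table of "Command:" header
-- lines consumed as (start, next_start) pairs with slices; objective: alternative decomposition.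

-- shared helpers: the literal Python expressions both sources contain
-- line.startswith("Command:")
def pvHeader (l : String) : Bool := PySem.Str.startswith l "Command:"
-- s.split(sep) with a nonempty separator: split? is some there, the .getD [] is unreachable
def pvSplit (s sep : String) : List String := (PySem.Str.split? s sep).getD []
-- line.split("Command:")[1].strip()  (index 1 always exists where both Pythons evaluate it,
-- since the line starts with the separator; the .getD "" default is unreachable there)
def pvCmdOf (l : String) : String :=
  PySem.Str.strip ((PySem.List.pyGet? (pvSplit l "Command:") 1).getD "")
-- "\n".join(cs)
def pvJoin (cs : List String) : String := PySem.Str.join "\n" cs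

-- ===== PORT A =====
-- the flush 'if current_command: sections[current_command] = "\n".join(current_section)'
-- (Python truthiness: None and "" are both falsy); appears twice in A, verbatim
def pvFlush (sections : PySem.Dict String String) (cc : Option String) (cs : List String) :
    PySem.Dict String String :=
  match cc with
  | some c => if c ≠ "" then sections.insert c (pvJoin cs) else sections
  | none => sections

def pvStepA (st : PySem.Dict String String × Option String × List String) (line : String) :
    PySem.Dict String String × Option String × List String :=
  if pvHeader line then
    (pvFlush st.1 st.2.1 st.2.2, some (pvCmdOf line), [])
  else
    match st.2.1 with
    | some c => if c ≠ "" then (st.1, st.2.1, st.2.2 ++ [line]) else st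
    | none => st

def section_output (output : String) : List (String × String) :=
  let lines := pvSplit (PySem.Str.strip output) "\n"
  let st := lines.foldl pvStepA (PySem.Dict.empty, none, [])
  (pvFlush st.1 st.2.1 st.2.2).items

-- ===== PORT B =====
def pvStepB (lines : List String) (sections : PySem.Dict String String) (p : Int × Int) :
    PySem.Dict String String :=
  let cmd := pvCmdOf ((PySem.List.pyGet? lines p.1).getD "")
  if cmd ≠ "" then
    sections.insert cmd (pvJoin (PySem.List.slice lines (some (p.1 + 1)) (some p.2)))
  else sections

def section_output_alt (output : String) : List (String × String) :=
  let lines := pvSplit (PySem.Str.strip output) "\n"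
  let starts := ((PySem.List.enumerate lines).filter (fun p => pvHeader p.2)).map (·.1)
  let pairs := starts.zip (starts.drop 1 ++ [(lines.length : Int)])
  (pairs.foldl (pvStepB lines) PySem.Dict.empty).items

-- ===== PRECONDITION & SPEC =====
def Spec_section_output (output : String) (out : List (String × String)) : Prop := out = section_output_alt output
instance (output : String) (out : List (String × String)) : Decidable (Spec_section_output output out) := by unfold Spec_section_output; infer_instance

-- ===== CLAIM (what is proved, stated in full; the proofs are below) =====
def Claim_equal_section_output : Prop := ∀ (output : String), Dom_section_output output → Spec_section_output output (section_output output)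

-- ===== LEMMAS AND PROOFS =====

-- common recursive description both loops are reduced to:
-- skip to the next header line, emit its section, recurse on the remainder
def pvG (d : PySem.Dict String String) : List String → PySem.Dict String String
  | [] => d
  | l :: rest =>
    if pvHeader l then
      pvG (if pvCmdOf l ≠ "" then d.insert (pvCmdOf l) (pvJoin (rest.takeWhile (fun x => !pvHeader x))) else d)
          (rest.dropWhile (fun x => !pvHeader x))
    else pvG d rest
  termination_by xs => xs.length
  decreasing_by
  · have := List.length_dropWhile_le (fun x => !pvHeader x) rest
    simp; omega
  · simp

-- A's loop equals pvG (joint invariant for the falsy and truthy current_command states)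
theorem pvA_inv (lines : List String) :
    (∀ (d : PySem.Dict String String) (cc : Option String) (cs : List String),
        (cc = none ∨ cc = some "") →
        pvFlush (lines.foldl pvStepA (d, cc, cs)).1 (lines.foldl pvStepA (d, cc, cs)).2.1
            (lines.foldl pvStepA (d, cc, cs)).2.2
          = pvG d (lines.dropWhile (fun x => !pvHeader x)))
    ∧ (∀ (d : PySem.Dict String String) (c : String) (cs : List String), c ≠ "" →
        pvFlush (lines.foldl pvStepA (d, some c, cs)).1 (lines.foldl pvStepA (d, some c, cs)).2.1
            (lines.foldl pvStepA (d, some c, cs)).2.2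
          = pvG (d.insert c (pvJoin (cs ++ lines.takeWhile (fun x => !pvHeader x))))
              (lines.dropWhile (fun x => !pvHeader x))) := by
  induction lines with
  | nil =>
    constructor
    · rintro d cc cs (rfl | rfl) <;> simp [pvFlush, pvG]
    · intro d c cs hc; simp [pvFlush, pvG, hc]
  | cons l rest ih =>
    obtain ⟨ih1, ih2⟩ := ih
    constructor
    · rintro d cc cs hcc
      by_cases hl : pvHeader l
      · have hstep : pvStepA (d, cc, cs) l = (d, some (pvCmdOf l), []) := by
          rcases hcc with rfl | rfl <;> simp [pvStepA, hl, pvFlush]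
        rw [List.foldl_cons, hstep, List.dropWhile_cons_of_neg (by simp [hl])]
        rw [pvG]
        simp only [hl, if_true]
        by_cases hc : pvCmdOf l = ""
        · rw [ih1 d (some (pvCmdOf l)) [] (Or.inr (by rw [hc]))]
          simp [hc]
        · rw [ih2 d (pvCmdOf l) [] hc]
          simp [hc]
      · have hstep : pvStepA (d, cc, cs) l = (d, cc, cs) := by
          rcases hcc with rfl | rfl <;> simp [pvStepA, hl]
        rw [List.foldl_cons, hstep, List.dropWhile_cons_of_pos (by simp [hl])]
        exact ih1 d cc cs hcc
    · intro d c cs hc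
      by_cases hl : pvHeader l
      · have hstep : pvStepA (d, some c, cs) l = (d.insert c (pvJoin cs), some (pvCmdOf l), []) := by
          simp [pvStepA, hl, pvFlush, hc]
        rw [List.foldl_cons, hstep, List.dropWhile_cons_of_neg (by simp [hl]),
          List.takeWhile_cons_of_neg (by simp [hl])]
        rw [pvG]
        simp only [hl, if_true, List.append_nil]
        by_cases hc2 : pvCmdOf l = ""
        · rw [ih1 _ (some (pvCmdOf l)) [] (Or.inr (by rw [hc2]))]
          simp [hc2]
        · rw [ih2 _ (pvCmdOf l) [] hc2]
          simp [hc2]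
      · have hstep : pvStepA (d, some c, cs) l = (d, some c, cs ++ [l]) := by
          simp [pvStepA, hl, hc]
        rw [List.foldl_cons, hstep, List.dropWhile_cons_of_pos (by simp [hl]),
          List.takeWhile_cons_of_pos (by simp [hl])]
        rw [ih2 d c (cs ++ [l]) hc]
        simp

-- B's header-index table, with the enumerate start kept general
def pvStarts (xs : List String) (s : Int) : List Int :=
  ((PySem.List.enumerate xs s).filter (fun p => pvHeader p.2)).map (·.1)

theorem pvStarts_cons (x : String) (xs : List String) (s : Int) :
    pvStarts (x :: xs) s =
      if pvHeader x then s :: pvStarts xs (s + 1) else pvStarts xs (s + 1) := by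
  simp [pvStarts, PySem.List.enumerate_cons, List.filter_cons]
  cases h : pvHeader x <;> simp

theorem pvStarts_nil_iff (xs : List String) (s : Int) :
    pvStarts xs s = [] ↔ ∀ x ∈ xs, pvHeader x = false := by
  induction xs generalizing s with
  | nil => simp [pvStarts]
  | cons x xs ih =>
    rw [pvStarts_cons]
    cases h : pvHeader x <;> simp [h, ih]

theorem pvStarts_head (xs : List String) (s b : Int) (t : List Int)
    (h : pvStarts xs s = b :: t) :
    b = s + ((xs.takeWhile (fun x => !pvHeader x)).length : Int) := by
  induction xs generalizing s b t with
  | nil => simp [pvStarts] at h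
  | cons x xs ih =>
    rw [pvStarts_cons] at h
    cases hx : pvHeader x <;> simp [hx] at h
    · have := ih (s + 1) b t h
      simp [hx, this]; ring
    · simp [hx, h.1]

-- lines[front.length] = l, and the two slice shapes B takes out of the full list
theorem pvGet_mid (front rest : List String) (l : String) :
    PySem.List.pyGet? (front ++ l :: rest) (front.length : Int) = some l := by
  rw [PySem.List.pyGet?_natCast, List.getElem?_append_right (le_refl _)]
  simp

theorem pvDrop_mid (front rest : List String) (l : String) :
    (front ++ l :: rest).drop (front.length + 1) = rest := by
  have h1 : front ++ l :: rest = (front ++ [l]) ++ rest := by simp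
  have h2 : (front ++ [l]).length = front.length + 1 := by simp
  rw [h1, ← h2, List.drop_left]

theorem pvSlice_all (front rest : List String) (l : String) :
    PySem.List.slice (front ++ l :: rest) (some ((front.length : Int) + 1))
      (some (((front ++ l :: rest).length : Nat) : Int)) = rest := by
  have h1 : ((front.length : Int) + 1) = ((front.length + 1 : Nat) : Int) := by push_cast; ring
  rw [h1, PySem.List.slice_natCast, pvDrop_mid]
  apply List.take_of_length_le
  simp
  omega

theorem pvSlice_tk (front rest : List String) (l : String) (n : Nat) :
    PySem.List.slice (front ++ l :: rest) (some ((front.length : Int) + 1))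
      (some ((front.length : Int) + 1 + (n : Int))) = rest.take n := by
  have h1 : ((front.length : Int) + 1) = ((front.length + 1 : Nat) : Int) := by push_cast; ring
  rw [h1, PySem.List.slice_natCast_add, pvDrop_mid]

theorem pvTake_tk (rest : List String) :
    rest.take (rest.takeWhile (fun x => !pvHeader x)).length
      = rest.takeWhile (fun x => !pvHeader x) :=
  ((List.prefix_iff_eq_take.mp (List.takeWhile_prefix _))).symm

-- B's fold over the (start, next_start) pairs equals pvG, generalized over the consumed prefix
theorem pvB_inv (rest : List String) : ∀ (front : List String) (d : PySem.Dict String String),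
    ((pvStarts rest (front.length : Int)).zip
        ((pvStarts rest (front.length : Int)).drop 1 ++ [((front ++ rest).length : Int)])).foldl
        (pvStepB (front ++ rest)) d
      = pvG d (rest.dropWhile (fun x => !pvHeader x)) := by
  induction rest with
  | nil => intro front d; simp [pvStarts, pvG]
  | cons l rest' ih =>
    intro front d
    by_cases hl : pvHeader l
    · rw [pvStarts_cons]
      simp only [hl, if_true]
      rw [List.dropWhile_cons_of_neg (by simp [hl]), pvG]
      simp only [hl, if_true]
      have hlen : ((front ++ [l]).length : Int) = (front.length : Int) + 1 := by simp
      rcases hs : pvStarts rest' ((front.length : Int) + 1) with _ | ⟨b, t⟩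
      · -- no header in rest': single pair (front.length, lines.length), section is all of rest'
        have hnone : ∀ x ∈ rest', pvHeader x = false := (pvStarts_nil_iff _ _).mp hs
        have htw : rest'.takeWhile (fun x => !pvHeader x) = rest' :=
          List.takeWhile_eq_self_iff.mpr (by intro x hx; simp [hnone x hx])
        have hdw : rest'.dropWhile (fun x => !pvHeader x) = [] :=
          List.dropWhile_eq_nil_iff.mpr (by intro x hx; simp [hnone x hx])
        simp only [List.drop_succ_cons, List.drop_nil, List.nil_append,
          List.zip_cons_cons, List.zip_nil_right, List.foldl_cons, List.foldl_nil]
        rw [hdw, htw, pvG]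
        simp only [pvStepB, pvGet_mid, Option.getD_some, pvSlice_all]
      · -- first pair (front.length, b): its slice is the body up to the next header at b
        simp only [List.drop_succ_cons, List.drop_zero, List.cons_append,
          List.zip_cons_cons, List.foldl_cons]
        have hb := pvStarts_head rest' _ b t hs
        have key := ih (front ++ [l]) (pvStepB (front ++ l :: rest') d
          ((front.length : Int), b))
        rw [hlen, hs, show (front ++ [l]) ++ rest' = front ++ l :: rest' from by simp] at key
        have hseed : pvStepB (front ++ l :: rest') d ((front.length : Int), b)
            = (if pvCmdOf l ≠ "" then
                d.insert (pvCmdOf l) (pvJoin (rest'.takeWhile (fun x => !pvHeader x))) else d) := by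
          simp only [pvStepB, pvGet_mid, Option.getD_some]
          rw [hb, pvSlice_tk, pvTake_tk]
        rw [hseed] at key ⊢
        exact key
    · rw [pvStarts_cons]
      simp only [hl]
      rw [List.dropWhile_cons_of_pos (by simp [hl])]
      have hlen : ((front ++ [l]).length : Int) = (front.length : Int) + 1 := by simp
      have key := ih (front ++ [l]) d
      rw [hlen, show (front ++ [l]) ++ rest' = front ++ l :: rest' from by simp] at key
      exact key

-- ===== VERDICT (by name: the statement is the Claim_ definition above) =====
theorem section_output_spec : Claim_equal_section_output := by
  intro output _
  unfold Spec_section_output section_output section_output_alt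
  have hA := (pvA_inv (pvSplit (PySem.Str.strip output) "\n")).1
      PySem.Dict.empty none [] (Or.inl rfl)
  have hB := pvB_inv (pvSplit (PySem.Str.strip output) "\n") [] PySem.Dict.empty
  simp only at hA hB
  simp only [pvStarts, List.nil_append, List.length_nil, Nat.cast_zero] at hB ⊢
  rw [hA, ← hB]
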